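-- pv_equiv track=rewrite | github.com/ssayed118/UMBC-CMSC-Projects | 201 - round 2/Exams/final/factorialize.py | dividing_factorial
-- ===== SOURCE A (Python) =====
-- def dividing_factorial(num, current = 1):
--     """
--     This function will take in a number and find the highest n! that divides a     number.
--     :param num: number that will be taken in, to get the highest n! for
--     """
--
--     #base case
--     if current == num:
--         return current
--
--     #recursive case
--     else:
--         if current < num:
--             if num % current == 0:
--
--             #finding the n! that divdes n, and setting to a variable
--                 var = num // current
--                 num = var
--                 return dividing_factorial(num, current + 1)
--
--             else:
--                 return current - 1
--
--         #if current is bigger than num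
--         else:
--             return current - 1
-- ===== SOURCE B (Python) =====
-- def dividing_factorial(num, current=1):
--     # Iterative while-loop form: divide out successive factors while divisible,
--     # then settle the terminal comparison once after the loop.
--     while current < num:
--         if num % current:
--             return current - 1
--         num //= current
--         current += 1
--     return current if current == num else current - 1
-- ===== Notes on version B (the rewrite author's own statement) =====
-- stated objective: simpler
-- what changed: Replaces the recursion with an iterative while loop that early-exits on a non-divisor and merges the two terminal branches (current==num vs current>num) into one post-loop conditional return.
import Mathlib
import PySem

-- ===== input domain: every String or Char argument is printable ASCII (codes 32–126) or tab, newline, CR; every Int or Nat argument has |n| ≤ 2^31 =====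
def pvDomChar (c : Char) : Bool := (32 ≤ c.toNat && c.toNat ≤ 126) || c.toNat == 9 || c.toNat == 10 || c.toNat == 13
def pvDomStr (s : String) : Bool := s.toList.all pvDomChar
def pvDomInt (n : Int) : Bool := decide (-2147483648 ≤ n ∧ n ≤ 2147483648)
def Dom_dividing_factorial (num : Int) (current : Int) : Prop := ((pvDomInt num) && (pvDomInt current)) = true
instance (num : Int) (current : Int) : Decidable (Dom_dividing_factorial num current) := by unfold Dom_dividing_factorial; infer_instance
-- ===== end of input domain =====

-- B rewrites the recursion as an iterative while loop with an early exit and a single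
-- post-loop terminal conditional (objective: simpler).


-- measure fact used by both ports' termination proofs
theorem df_measure_lt (num current : Int) (hlt : current < num)
    (hm : PySem.Int.mod num current = 0) :
    (PySem.Int.floordiv num current - (current + 1)).toNat < (num - current).toNat := by
  by_cases hc0 : current = 0
  · subst hc0
    have : num = 0 := by simpa [PySem.Int.mod] using hm
    omega
  · have key := PySem.Int.floordiv_mul_add_mod num current
    rw [hm, add_zero] at key
    -- key : floordiv num current * current = num
    have hle : PySem.Int.floordiv num current ≤ num := by
      rcases lt_trichotomy current 0 with hneg | hz | hpos
      · by_cases h : PySem.Int.floordiv num current ≤ 0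
        · nlinarith [key]
        · exfalso
          have h1 : 1 ≤ PySem.Int.floordiv num current := by omega
          nlinarith [key]
      · exact absurd hz hc0
      · nlinarith [key]
    omega

-- ===== PORT A =====
def dividing_factorial (num : Int) (current : Int) : Int :=
  if current == num then current
  else
    if current < num then
      if PySem.Int.mod num current == 0 then
        dividing_factorial (PySem.Int.floordiv num current) (current + 1)
      else current - 1
    else current - 1
termination_by (num - current).toNat
decreasing_by
  rename_i _h1 h2 h3
  exact df_measure_lt num current h2 (by simpa using h3)

-- ===== PORT B =====
-- the while loop of Source B: state (num, current), early exit on a non-divisor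
def dfLoop (num : Int) (current : Int) : Int :=
  if current < num then
    if PySem.Int.mod num current ≠ 0 then current - 1
    else dfLoop (PySem.Int.floordiv num current) (current + 1)
  else if current == num then current else current - 1
termination_by (num - current).toNat
decreasing_by
  rename_i h1 h2
  exact df_measure_lt num current h1 (by simpa using h2)

def dividing_factorial_alt (num : Int) (current : Int) : Int := dfLoop num current

-- ===== PRECONDITION & SPEC =====
-- Pre_ excludes exactly the inputs where the Python A raises ZeroDivisionError
-- (current = 0 with 0 < num reaches 'num % 0'); A returns on every other input.
def Pre_dividing_factorial (num : Int) (current : Int) : Prop := ¬ (current = 0 ∧ 0 < num)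
instance (num : Int) (current : Int) : Decidable (Pre_dividing_factorial num current) := by
  unfold Pre_dividing_factorial; infer_instance
def pvWitness_dividing_factorial : Int × Int := (720, 1)

def Spec_dividing_factorial (num : Int) (current : Int) (out : Int) : Prop := out = dividing_factorial_alt num current
instance (num : Int) (current : Int) (out : Int) : Decidable (Spec_dividing_factorial num current out) := by unfold Spec_dividing_factorial; infer_instance

-- ===== CLAIM (what is proved, stated in full; the proofs are below) =====
def Claim_equal_dividing_factorial : Prop := ∀ (num : Int) (current : Int), Dom_dividing_factorial num current → Pre_dividing_factorial num current → Spec_dividing_factorial num current (dividing_factorial num current)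

-- ===== LEMMAS AND PROOFS =====
theorem df_eq_loop (num current : Int) : dividing_factorial num current = dfLoop num current := by
  fun_induction dividing_factorial num current with
  | case1 num current heq =>
    rw [dfLoop]
    have : ¬ current < num := by simp at heq; omega
    simp [this, heq]
  | case2 num current heq hlt hm ih =>
    rw [dfLoop]
    simp only [hlt, if_pos]
    simp at hm
    simp [hm, ih]
  | case3 num current heq hlt hm =>
    rw [dfLoop]
    simp at hm
    simp [hlt, hm]
  | case4 num current heq hlt =>
    rw [dfLoop]
    simp [hlt, heq]

-- ===== VERDICT (by name: the statement is the Claim_ definition above) =====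
theorem dividing_factorial_spec : Claim_equal_dividing_factorial := by
  intro num current _ _
  unfold Spec_dividing_factorial dividing_factorial_alt
  exact df_eq_loop num current
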